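-- pv_equiv track=rewrite | github.com/Alextheon3/BusinessPilot-AI | backend/app/services/business_verification_service.py | _validate_afm
-- ===== SOURCE A (Python) =====
-- def _validate_afm(afm: str) -> bool:
--     """Validate Greek AFM using checksum algorithm"""
--     if not afm or len(afm) != 9 or not afm.isdigit():
--         return False
--
--     # AFM checksum algorithm
--     weights = [256, 128, 64, 32, 16, 8, 4, 2]
--     total = sum(int(afm[i]) * weights[i] for i in range(8))
--
--     checksum = total % 11
--     if checksum == 10:
--         checksum = 0
--
--     return checksum == int(afm[8])
-- ===== SOURCE B (Python) =====
-- def _validate_afm(afm: str) -> bool: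
--     if not afm or len(afm) != 9 or not afm.isdigit():
--         return False
--
--     # Horner accumulator over the first 8 digits: acc = sum d_i * 2^(7-i)
--     acc = 0
--     for ch in afm[:8]:
--         acc = acc * 2 + int(ch)
--
--     checksum = (2 * acc) % 11
--     if checksum == 10:
--         checksum = 0
--
--     return checksum == int(afm[8])
-- ===== Notes on version B (the rewrite author's own statement) =====
-- stated objective: simpler
-- what changed: Replaces the weight table and index-based generator sum with a single left-to-right Horner accumulator (acc = acc*2 + digit) over the first 8 characters, doubled once at the end.
import Mathlib
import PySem

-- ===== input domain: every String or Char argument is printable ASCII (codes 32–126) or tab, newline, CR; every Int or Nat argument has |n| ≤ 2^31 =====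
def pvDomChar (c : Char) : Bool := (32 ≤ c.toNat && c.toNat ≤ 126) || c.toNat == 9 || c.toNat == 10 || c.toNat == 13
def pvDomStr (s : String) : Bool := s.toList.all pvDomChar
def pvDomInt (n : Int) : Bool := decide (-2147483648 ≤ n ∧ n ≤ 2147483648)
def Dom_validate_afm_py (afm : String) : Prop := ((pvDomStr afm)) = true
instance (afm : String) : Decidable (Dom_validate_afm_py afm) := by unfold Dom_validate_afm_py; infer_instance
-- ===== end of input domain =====

-- B replaces A's weight table and index-based weighted sum with a single Horner
-- accumulator over the first 8 digits (objective: simpler decomposition).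

-- int(c) for a single digit character; exact on digit chars, which both ports
-- guard with isdigit before using it.
def pvDigit (c : Char) : Int := (c.toNat : Int) - 48

-- ===== PORT A =====
def validate_afm_py (afm : String) : Bool :=
  let cs := afm.toList
  if cs.length = 0 ∨ cs.length ≠ 9 ∨ ¬ PySem.Chars.strIsdigit cs then false
  else
    let weights : List Int := [256, 128, 64, 32, 16, 8, 4, 2]
    let total : Int := ((PySem.List.pyRange 0 8 1).map
      (fun i => pvDigit (cs.getD i.toNat ' ') * weights.getD i.toNat 0)).sum
    let checksum := PySem.Int.mod total 11
    let checksum := if checksum = 10 then 0 else checksum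
    checksum = pvDigit (cs.getD 8 ' ')

-- ===== PORT B =====
def validate_afm_py_alt (afm : String) : Bool :=
  let cs := afm.toList
  if cs.length = 0 ∨ cs.length ≠ 9 ∨ ¬ PySem.Chars.strIsdigit cs then false
  else
    let acc : Int := (cs.take 8).foldl (fun a c => a * 2 + pvDigit c) 0
    let checksum := PySem.Int.mod (2 * acc) 11
    (if checksum = 10 then 0 else checksum) = pvDigit (cs.getD 8 ' ')

-- ===== PRECONDITION & SPEC =====
def Spec_validate_afm_py (afm : String) (out : Bool) : Prop := out = validate_afm_py_alt afm
instance (afm : String) (out : Bool) : Decidable (Spec_validate_afm_py afm out) := by unfold Spec_validate_afm_py; infer_instance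

-- ===== CLAIM (what is proved, stated in full; the proofs are below) =====
def Claim_equal_validate_afm_py : Prop := ∀ (afm : String), Dom_validate_afm_py afm → Spec_validate_afm_py afm (validate_afm_py afm)

-- ===== LEMMAS AND PROOFS =====

theorem validate_afm_eq (afm : String) :
    validate_afm_py afm = validate_afm_py_alt afm := by
  unfold validate_afm_py validate_afm_py_alt
  set cs := afm.toList with hcs
  by_cases h : cs.length = 0 ∨ cs.length ≠ 9 ∨ ¬ PySem.Chars.strIsdigit cs
  · simp only [if_pos h]
  · simp only [if_neg h]
    push Not at h
    obtain ⟨-, hlen, -⟩ := h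
    have hr : PySem.List.pyRange 0 8 1 = [0, 1, 2, 3, 4, 5, 6, 7] := by decide
    match cs, hlen with
    | [a, b, c, d, e, f, g, h, i], _ =>
      simp only [hr]
      norm_num [Int.toNat]
      ring_nf

-- ===== VERDICT (by name: the statement is the Claim_ definition above) =====
theorem validate_afm_py_spec : Claim_equal_validate_afm_py := by
  intro afm _
  unfold Spec_validate_afm_py
  exact validate_afm_eq afm
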